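-- pv_equiv track=rewrite | github.com/tk3054/dlbcl-deep-learning | csvOps/make_pretty_view.py | _order_columns
-- ===== SOURCE A (Python) =====
-- from typing import Dict, List, Tuple
--
-- INTENSITY_STATS = {"mean", "median", "std", "min", "max", "intden", "rawintden"}
--
-- def _split_channel_stat(col: str) -> Tuple[str, str]:
--     parts = col.split("_")
--     if len(parts) < 2:
--         return col, ""
--     stat = parts[-1]
--     channel = "_".join(parts[:-1])
--     return channel, stat
--
-- def _order_columns(columns: List[str]) -> Tuple[List[str], List[str], List[str], List[str]]:
--     id_cols = []
--     mean_cols = []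
--     median_cols = []
--     other_intensity = []
--
--     for col in columns:
--         channel, stat = _split_channel_stat(col)
--         if stat in INTENSITY_STATS and channel != col:
--             if stat == "mean":
--                 mean_cols.append(col)
--             elif stat == "median":
--                 median_cols.append(col)
--             else:
--                 other_intensity.append(col)
--         else:
--             id_cols.append(col)
--
--     mean_cols = sorted(mean_cols)
--     median_cols = sorted(median_cols)
--     other_intensity = sorted(other_intensity)
--     return id_cols, mean_cols, median_cols, other_intensity
-- ===== SOURCE B (Python) =====
-- from typing import List, Tuple
--
-- INTENSITY_STATS = {"mean", "median", "std", "min", "max", "intden", "rawintden"}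
--
-- def _split_channel_stat(col: str) -> Tuple[str, str]:
--     parts = col.split("_")
--     if len(parts) < 2:
--         return col, ""
--     stat = parts[-1]
--     channel = "_".join(parts[:-1])
--     return channel, stat
--
-- def _is_intensity(col: str) -> bool:
--     channel, stat = _split_channel_stat(col)
--     return stat in INTENSITY_STATS and channel != col
--
-- def _order_columns(columns: List[str]) -> Tuple[List[str], List[str], List[str], List[str]]:
--     # id columns keep their input order: one filtering pass over the original list
--     id_cols = [col for col in columns if not _is_intensity(col)]
--     # sort everything once, then one pass distributes the intensity columns:
--     # each bucket inherits sorted order, so no per-bucket sort is needed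
--     mean_cols, median_cols, other_intensity = [], [], []
--     for col in sorted(columns):
--         channel, stat = _split_channel_stat(col)
--         if stat in INTENSITY_STATS and channel != col:
--             if stat == "mean":
--                 mean_cols.append(col)
--             elif stat == "median":
--                 median_cols.append(col)
--             else:
--                 other_intensity.append(col)
--     return id_cols, mean_cols, median_cols, other_intensity
-- ===== Notes on version B (the rewrite author's own statement) =====
-- stated objective: alternative
-- what changed: B builds id_cols by a single filtering pass over the original list and replaces A's three per-bucket sorts by one global sort followed by a single distributing pass (each bucket inherits sorted order).
import Mathlib
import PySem

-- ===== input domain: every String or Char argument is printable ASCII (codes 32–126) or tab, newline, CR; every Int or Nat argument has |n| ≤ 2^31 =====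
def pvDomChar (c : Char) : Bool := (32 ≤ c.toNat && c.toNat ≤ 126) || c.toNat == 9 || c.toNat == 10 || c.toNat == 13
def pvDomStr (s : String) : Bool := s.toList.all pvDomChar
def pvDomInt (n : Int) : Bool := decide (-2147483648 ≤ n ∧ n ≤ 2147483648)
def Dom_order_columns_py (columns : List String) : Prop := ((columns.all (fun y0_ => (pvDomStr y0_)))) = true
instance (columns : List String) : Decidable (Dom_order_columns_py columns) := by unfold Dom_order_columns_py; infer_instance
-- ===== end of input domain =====

-- B replaces A's three per-bucket sorts by one global sort followed by a single
-- distributing pass, and builds id_cols by one filtering pass over the original list.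

-- ===== PORT A =====
def INTENSITY_STATS : PySem.Set String :=
  PySem.Set.ofList ["mean", "median", "std", "min", "max", "intden", "rawintden"]

-- parts[-1]: parts = col.split("_") is never empty, so the .getD "" default is unreachable
def split_channel_stat (col : String) : String × String :=
  let parts := (PySem.Str.split? col "_").getD []   -- sep "_" ≠ "", so split? is some
  if parts.length < 2 then (col, "")
  else (PySem.Str.join "_" (PySem.List.slice parts none (some (-1))),
        (PySem.List.pyGet? parts (-1)).getD "")

def order_columns_py (columns : List String) : List String × List String × List String × List String :=
  let r := columns.foldl
    (fun (acc : List String × List String × List String × List String) col =>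
      let cs := split_channel_stat col
      if INTENSITY_STATS.contains cs.2 && cs.1 != col then
        if cs.2 == "mean" then (acc.1, acc.2.1 ++ [col], acc.2.2.1, acc.2.2.2)
        else if cs.2 == "median" then (acc.1, acc.2.1, acc.2.2.1 ++ [col], acc.2.2.2)
        else (acc.1, acc.2.1, acc.2.2.1, acc.2.2.2 ++ [col])
      else (acc.1 ++ [col], acc.2.1, acc.2.2.1, acc.2.2.2))
    ([], [], [], [])
  (r.1, PySem.List.sorted r.2.1 (fun x => x) false,
        PySem.List.sorted r.2.2.1 (fun x => x) false,
        PySem.List.sorted r.2.2.2 (fun x => x) false)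

-- ===== PORT B =====
def is_intensity (col : String) : Bool :=
  let cs := split_channel_stat col
  INTENSITY_STATS.contains cs.2 && cs.1 != col

def order_columns_py_alt (columns : List String) : List String × List String × List String × List String :=
  let id_cols := columns.filter (fun col => !(is_intensity col))
  let b := (PySem.List.sorted columns (fun x => x) false).foldl
    (fun (acc : List String × List String × List String) col =>
      let cs := split_channel_stat col
      if INTENSITY_STATS.contains cs.2 && cs.1 != col then
        if cs.2 == "mean" then (acc.1 ++ [col], acc.2.1, acc.2.2)
        else if cs.2 == "median" then (acc.1, acc.2.1 ++ [col], acc.2.2)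
        else (acc.1, acc.2.1, acc.2.2 ++ [col])
      else acc)
    ([], [], [])
  (id_cols, b.1, b.2.1, b.2.2)

-- ===== PRECONDITION & SPEC =====
def Spec_order_columns_py (columns : List String) (out : List String × List String × List String × List String) : Prop := out = order_columns_py_alt columns
instance (columns : List String) (out : List String × List String × List String × List String) : Decidable (Spec_order_columns_py columns out) := by unfold Spec_order_columns_py; infer_instance

-- ===== CLAIM (what is proved, stated in full; the proofs are below) =====
def Claim_equal_order_columns_py : Prop := ∀ (columns : List String), Dom_order_columns_py columns → Spec_order_columns_py columns (order_columns_py columns)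

-- ===== LEMMAS AND PROOFS =====
-- per-column bucket predicates (in terms of the shared classifier)
def pMean (col : String) : Bool := is_intensity col && (split_channel_stat col).2 == "mean"
def pMedian (col : String) : Bool :=
  is_intensity col && !((split_channel_stat col).2 == "mean") && (split_channel_stat col).2 == "median"
def pOther (col : String) : Bool :=
  is_intensity col && !((split_channel_stat col).2 == "mean") && !((split_channel_stat col).2 == "median")

theorem cons_filter_append (p : String → Bool) (x : String) (xs a : List String) :
    a ++ ((if p x then [x] else []) ++ xs.filter p) = a ++ (x :: xs).filter p := by
  by_cases h : p x <;> simp [List.filter_cons, h]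

def stepA (acc : List String × List String × List String × List String) (col : String) :
    List String × List String × List String × List String :=
  let cs := split_channel_stat col
  if INTENSITY_STATS.contains cs.2 && cs.1 != col then
    if cs.2 == "mean" then (acc.1, acc.2.1 ++ [col], acc.2.2.1, acc.2.2.2)
    else if cs.2 == "median" then (acc.1, acc.2.1, acc.2.2.1 ++ [col], acc.2.2.2)
    else (acc.1, acc.2.1, acc.2.2.1, acc.2.2.2 ++ [col])
  else (acc.1 ++ [col], acc.2.1, acc.2.2.1, acc.2.2.2)

def stepB (acc : List String × List String × List String) (col : String) :
    List String × List String × List String :=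
  let cs := split_channel_stat col
  if INTENSITY_STATS.contains cs.2 && cs.1 != col then
    if cs.2 == "mean" then (acc.1 ++ [col], acc.2.1, acc.2.2)
    else if cs.2 == "median" then (acc.1, acc.2.1 ++ [col], acc.2.2)
    else (acc.1, acc.2.1, acc.2.2 ++ [col])
  else acc

theorem stepA_apply (acc : List String × List String × List String × List String) (x : String) :
    stepA acc x
      = (acc.1 ++ (if !(is_intensity x) then [x] else []),
         acc.2.1 ++ (if pMean x then [x] else []),
         acc.2.2.1 ++ (if pMedian x then [x] else []),
         acc.2.2.2 ++ (if pOther x then [x] else [])) := by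
  unfold stepA pMean pMedian pOther is_intensity
  cases hb : (INTENSITY_STATS.contains (split_channel_stat x).2 && ((split_channel_stat x).1 != x)) <;>
    cases hm : ((split_channel_stat x).2 == "mean") <;>
      cases hd : ((split_channel_stat x).2 == "median") <;>
        first
          | (rw [eq_of_beq hm] at hd; exact absurd hd (by decide))
          | (simp [hb, hm, hd]; done)
          | (simp at hb; simp [hb, hm, hd]; done)
          | (simp at hb; simp [hm, hd]; tauto)

theorem stepB_apply (acc : List String × List String × List String) (x : String) :
    stepB acc x
      = (acc.1 ++ (if pMean x then [x] else []),
         acc.2.1 ++ (if pMedian x then [x] else []),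
         acc.2.2 ++ (if pOther x then [x] else [])) := by
  unfold stepB pMean pMedian pOther is_intensity
  cases hb : (INTENSITY_STATS.contains (split_channel_stat x).2 && ((split_channel_stat x).1 != x)) <;>
    cases hm : ((split_channel_stat x).2 == "mean") <;>
      cases hd : ((split_channel_stat x).2 == "median") <;>
        first
          | (rw [eq_of_beq hm] at hd; exact absurd hd (by decide))
          | (simp [hb, hm, hd]; done)
          | (simp at hb; simp [hb, hm, hd]; done)
          | (simp at hb; simp [hm, hd]; tauto)

theorem foldA_eq (cols : List String) (a b c d : List String) :
    cols.foldl
      (fun (acc : List String × List String × List String × List String) col =>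
        let cs := split_channel_stat col
        if INTENSITY_STATS.contains cs.2 && cs.1 != col then
          if cs.2 == "mean" then (acc.1, acc.2.1 ++ [col], acc.2.2.1, acc.2.2.2)
          else if cs.2 == "median" then (acc.1, acc.2.1, acc.2.2.1 ++ [col], acc.2.2.2)
          else (acc.1, acc.2.1, acc.2.2.1, acc.2.2.2 ++ [col])
        else (acc.1 ++ [col], acc.2.1, acc.2.2.1, acc.2.2.2))
      (a, b, c, d)
    = (a ++ cols.filter (fun col => !(is_intensity col)),
       b ++ cols.filter pMean, c ++ cols.filter pMedian, d ++ cols.filter pOther) := by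
  show cols.foldl stepA (a, b, c, d) = _
  induction cols generalizing a b c d with
  | nil => simp
  | cons x xs ih =>
    rw [List.foldl_cons, stepA_apply, ih]
    simp only [List.append_assoc]
    rw [cons_filter_append, cons_filter_append, cons_filter_append]
    by_cases h : is_intensity x <;> simp [List.filter_cons, h]

theorem foldB_eq (cols : List String) (a b c : List String) :
    cols.foldl
      (fun (acc : List String × List String × List String) col =>
        let cs := split_channel_stat col
        if INTENSITY_STATS.contains cs.2 && cs.1 != col then
          if cs.2 == "mean" then (acc.1 ++ [col], acc.2.1, acc.2.2)
          else if cs.2 == "median" then (acc.1, acc.2.1 ++ [col], acc.2.2)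
          else (acc.1, acc.2.1, acc.2.2 ++ [col])
        else acc)
      (a, b, c)
    = (a ++ cols.filter pMean, b ++ cols.filter pMedian, c ++ cols.filter pOther) := by
  show cols.foldl stepB (a, b, c) = _
  induction cols generalizing a b c with
  | nil => simp
  | cons x xs ih =>
    rw [List.foldl_cons, stepB_apply, ih]
    simp only [List.append_assoc]
    rw [cons_filter_append, cons_filter_append, cons_filter_append]

-- sorting a filtered list = filtering the sorted list (Python's sort on plain strings)
theorem sorted_filter_comm (p : String → Bool) (cols : List String) :
    PySem.List.sorted (cols.filter p) (fun x => x) false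
      = (PySem.List.sorted cols (fun x => x) false).filter p := by
  apply PySem.List.sorted_id_eq_of_perm_of_pairwise
  · exact (PySem.List.sorted_perm cols (fun x => x) false).filter p
  · exact List.Pairwise.sublist List.filter_sublist
      (PySem.List.sorted_pairwise cols (fun x => x))

-- ===== VERDICT (by name: the statement is the Claim_ definition above) =====
theorem order_columns_py_spec : Claim_equal_order_columns_py := by
  intro columns _
  unfold Spec_order_columns_py order_columns_py order_columns_py_alt
  rw [foldA_eq, foldB_eq]
  simp [sorted_filter_comm]
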